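-- pv_equiv track=rewrite | github.com/heathcliffeth7/Tracker | Tracker.py | parse_authorization_entry
-- ===== SOURCE A (Python) =====
-- from typing import List, Dict, Any, Optional, Set, Tuple
--
-- def parse_authorization_entry(entry: str, default_type: str = 'user') -> Optional[Tuple[str, str]]:
--     """Parse authorization entry into (type, id) tuple"""
--     if not entry:
--         return None
--
--     value = entry.strip()
--     if not value:
--         return None
--
--     entry_type = default_type
--     lowered = value.lower()
--
--     if lowered.startswith('role:'):
--         entry_type = 'role'
--         value = value.split(':', 1)[1].strip()
--     elif lowered.startswith('user:'):
--         entry_type = 'user'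
--         value = value.split(':', 1)[1].strip()
--
--     if value.startswith('<@') and value.endswith('>'):
--         inner = value[2:-1]
--         if inner.startswith('&'):
--             entry_type = 'role'
--             inner = inner[1:]
--         elif inner.startswith('!'):
--             inner = inner[1:]
--         value = inner
--
--     value = value.strip()
--     if not value:
--         return None
--
--     if value.lower().startswith('role:') or value.lower().startswith('user:'):
--         return parse_authorization_entry(value)
--
--     return entry_type, value
-- ===== SOURCE B (Python) =====
-- from typing import Optional, Tuple
--
--
-- def _split_prefix(value: str) -> Optional[Tuple[str, str]]:
--     """If value carries a role:/user: prefix (case-insensitive), return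
--     (type, rest stripped), else None."""
--     head = value[:5].lower()
--     if head == 'role:':
--         return 'role', value[5:].strip()
--     if head == 'user:':
--         return 'user', value[5:].strip()
--     return None
--
--
-- def _apply_prefix(entry_type: str, value: str) -> Tuple[str, str]:
--     p = _split_prefix(value)
--     return p if p is not None else (entry_type, value)
--
--
-- def _unwrap_mention(entry_type: str, value: str) -> Tuple[str, str]:
--     if not (value.startswith('<@') and value.endswith('>')):
--         return entry_type, value
--     inner = value[2:-1]
--     if inner.startswith('&'):
--         return 'role', inner[1:]
--     if inner.startswith('!'):
--         return entry_type, inner[1:]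
--     return entry_type, inner
--
--
-- def parse_authorization_entry(entry: str, default_type: str = 'user'):
--     """Parse authorization entry into (type, id) tuple"""
--     if not entry:
--         return None
--     entry_type, value = default_type, entry.strip()
--     if not value:
--         return None
--     while True:
--         entry_type, value = _apply_prefix(entry_type, value)
--         entry_type, value = _unwrap_mention(entry_type, value)
--         value = value.strip()
--         if not value:
--             return None
--         if _split_prefix(value) is None:
--             return entry_type, value
-- ===== Notes on version B (the rewrite author's own statement) =====
-- stated objective: alternative
-- what changed: B replaces A's monolithic tail recursion with an explicit while loop built from three small helpers (_split_prefix, _apply_prefix, _unwrap_mention) that carry the running (type, value) state across iterations; the prefix test compares the lowered 5-character head slice and drops the prefix by slicing instead of lowering the whole value and calling split(':', 1).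
import Mathlib
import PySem

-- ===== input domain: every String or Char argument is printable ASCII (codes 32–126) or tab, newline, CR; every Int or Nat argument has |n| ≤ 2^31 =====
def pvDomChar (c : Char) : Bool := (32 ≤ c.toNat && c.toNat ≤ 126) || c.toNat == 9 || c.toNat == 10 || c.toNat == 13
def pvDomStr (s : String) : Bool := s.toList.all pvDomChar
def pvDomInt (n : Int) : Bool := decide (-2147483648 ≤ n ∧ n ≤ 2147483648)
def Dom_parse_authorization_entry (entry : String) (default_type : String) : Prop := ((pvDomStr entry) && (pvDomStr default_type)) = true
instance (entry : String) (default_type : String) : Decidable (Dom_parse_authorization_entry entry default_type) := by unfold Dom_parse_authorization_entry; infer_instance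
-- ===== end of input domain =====

-- B re-implements A's monolithic tail recursion as an explicit while loop built from
-- small helper functions (_split_prefix comparing the lowered 5-char head slice,
-- _apply_prefix, _unwrap_mention); same return value, no side effects.
-- Both recursions are ported with a fuel counter entry.length+1 (a totality guard only;
-- the proofs show it never runs out on the recursion's strictly shrinking value).

-- ===== PORT A =====
def pvAgo : Nat → String → String → Option (String × String)
  | 0, _, _ => none  -- fuel guard, never reached (each recursion strictly shrinks the value)
  | fuel+1, entry, default_type =>
    if entry = "" then none
    else
      let value := PySem.Str.strip entry
      if value = "" then none
      else
        let lowered := PySem.Str.lower value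
        let tv :=
          if PySem.Str.startswith lowered "role:" = true then
            -- value.split(':', 1)[1]: index 1 always exists here since value contains ':'
            ("role", PySem.Str.strip ((((PySem.Str.splitMax? value ":" 1).getD [])[1]?).getD ""))
          else if PySem.Str.startswith lowered "user:" = true then
            ("user", PySem.Str.strip ((((PySem.Str.splitMax? value ":" 1).getD [])[1]?).getD ""))
          else (default_type, value)
        let tv2 :=
          if PySem.Str.startswith tv.2 "<@" && PySem.Str.endswith tv.2 ">" then
            let inner := PySem.Str.slice tv.2 (some 2) (some (-1))
            if PySem.Str.startswith inner "&" = true then ("role", PySem.Str.slice inner (some 1) none)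
            else if PySem.Str.startswith inner "!" = true then (tv.1, PySem.Str.slice inner (some 1) none)
            else (tv.1, inner)
          else tv
        let value2 := PySem.Str.strip tv2.2
        if value2 = "" then none
        else if PySem.Str.startswith (PySem.Str.lower value2) "role:" ||
                PySem.Str.startswith (PySem.Str.lower value2) "user:" then
          pvAgo fuel value2 "user"
        else some (tv2.1, value2)

def parse_authorization_entry (entry : String) (default_type : String) : Option (String × String) :=
  pvAgo (entry.length + 1) entry default_type

-- ===== PORT B =====

-- _split_prefix: compare the lowered 5-character head slice against 'role:'/'user:'
def pvSplitPrefix (value : String) : Option (String × String) :=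
  let head := PySem.Str.lower (PySem.Str.slice value none (some 5))
  if head = "role:" then some ("role", PySem.Str.strip (PySem.Str.slice value (some 5) none))
  else if head = "user:" then some ("user", PySem.Str.strip (PySem.Str.slice value (some 5) none))
  else none

-- _apply_prefix
def pvApplyPrefix (entry_type : String) (value : String) : String × String :=
  match pvSplitPrefix value with
  | some p => p
  | none => (entry_type, value)

-- _unwrap_mention
def pvUnwrapMention (entry_type : String) (value : String) : String × String :=
  if ¬ ((PySem.Str.startswith value "<@" && PySem.Str.endswith value ">") = true) then
    (entry_type, value)
  else
    let inner := PySem.Str.slice value (some 2) (some (-1))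
    if PySem.Str.startswith inner "&" = true then ("role", PySem.Str.slice inner (some 1) none)
    else if PySem.Str.startswith inner "!" = true then (entry_type, PySem.Str.slice inner (some 1) none)
    else (entry_type, inner)

-- the while loop of B, carrying the running (entry_type, value) state
def pvBloop : Nat → String → String → Option (String × String)
  | 0, _, _ => none  -- fuel guard, never reached (each iteration strictly shrinks the value)
  | fuel+1, value, entry_type =>
    let st := pvUnwrapMention (pvApplyPrefix entry_type value).1 (pvApplyPrefix entry_type value).2
    let value2 := PySem.Str.strip st.2
    if value2 = "" then none
    else if pvSplitPrefix value2 = none then some (st.1, value2)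
    else pvBloop fuel value2 st.1

def parse_authorization_entry_alt (entry : String) (default_type : String) : Option (String × String) :=
  if entry = "" then none
  else
    let value := PySem.Str.strip entry
    if value = "" then none
    else pvBloop (entry.length + 1) value default_type

-- ===== PRECONDITION & SPEC =====
def Spec_parse_authorization_entry (entry : String) (default_type : String) (out : Option (String × String)) : Prop := out = parse_authorization_entry_alt entry default_type
instance (entry : String) (default_type : String) (out : Option (String × String)) : Decidable (Spec_parse_authorization_entry entry default_type out) := by unfold Spec_parse_authorization_entry; infer_instance

-- ===== CLAIM (what is proved, stated in full; the proofs are below) =====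
def Claim_equal_parse_authorization_entry : Prop := ∀ (entry : String) (default_type : String), Dom_parse_authorization_entry entry default_type → Spec_parse_authorization_entry entry default_type (parse_authorization_entry entry default_type)

-- ===== LEMMAS AND PROOFS =====

theorem pvStripLen (l : List Char) :
    (PySem.Chars.strip l).length ≤ l.length := by
  simp only [PySem.Chars.strip, PySem.Chars.lstrip, PySem.Chars.rstrip, List.length_reverse]
  calc (List.dropWhile PySem.Chars.isspace (List.dropWhile PySem.Chars.isspace l).reverse).length
      ≤ (List.dropWhile PySem.Chars.isspace l).reverse.length := List.length_dropWhile_le _ _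
    _ = (List.dropWhile PySem.Chars.isspace l).length := List.length_reverse
    _ ≤ l.length := List.length_dropWhile_le _ _

theorem pvLowerCharColon (c : Char) (h : PySem.Chars.lowerChar c = ':') : c = ':' := by
  by_cases hu : PySem.Chars.isupper c = true
  · exfalso
    simp only [PySem.Chars.lowerChar, hu, if_true] at h
    have hAZ : 'A' ≤ c ∧ c ≤ 'Z' := by simpa [PySem.Chars.isupper] using hu
    have h65 : 65 ≤ c.toNat := by
      rw [Char.le_def] at hAZ; exact UInt32.le_iff_toNat_le.mp hAZ.1
    have h90 : c.toNat ≤ 90 := by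
      have := hAZ.2; rw [Char.le_def] at this; exact UInt32.le_iff_toNat_le.mp this
    have hval : (c.toNat + 32).isValidChar := Or.inl (by omega)
    have := congrArg Char.toNat h
    rw [Char.toNat_ofNat, if_pos hval] at this
    have h58 : (':').toNat = 58 := by decide
    omega
  · simpa [PySem.Chars.lowerChar, hu] using h

theorem pvLowerCharNeColon (x c : Char) (hx : x ≠ ':') (h : PySem.Chars.lowerChar c = x) : c ≠ ':' := by
  intro hc
  subst hc
  exact hx (by rw [← h]; decide)

theorem pvGoMZero (f : Nat) (l cur : List Char) (acc : List (List Char)) :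
    PySem.Chars.splitOnMax.go [':'] f 0 l cur acc = ((cur.reverse ++ l) :: acc).reverse := by
  cases f with
  | zero => rw [PySem.Chars.splitOnMax.go.eq_def]
  | succ f => cases l with
    | nil => rw [PySem.Chars.splitOnMax.go.eq_def]; simp
    | cons c rest => rw [PySem.Chars.splitOnMax.go.eq_def]; simp

theorem pvGoConsNe (f m : Nat) (hm : m ≠ 0) (c : Char) (hc : c ≠ ':') (rest cur : List Char)
    (acc : List (List Char)) :
    PySem.Chars.splitOnMax.go [':'] (f+1) m (c::rest) cur acc
      = PySem.Chars.splitOnMax.go [':'] f m rest (c::cur) acc := by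
  rw [PySem.Chars.splitOnMax.go.eq_def]
  simp [hm, List.isPrefixOf, Ne.symm hc]

theorem pvGoColon (f : Nat) (rest cur : List Char) (acc : List (List Char)) :
    PySem.Chars.splitOnMax.go [':'] (f+1) 1 (':'::rest) cur acc
      = PySem.Chars.splitOnMax.go [':'] f 0 rest [] (cur.reverse :: acc) := by
  rw [PySem.Chars.splitOnMax.go.eq_def]
  simp [List.isPrefixOf]

theorem pvSplitColon (a b c d : Char) (rest : List Char)
    (ha : a ≠ ':') (hb : b ≠ ':') (hc : c ≠ ':') (hd : d ≠ ':') :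
    PySem.Chars.splitOnMax (a::b::c::d::':'::rest) [':'] 1 = [[a,b,c,d], rest] := by
  have h1 : ¬ ((1:Int) < 0) := by norm_num
  simp only [PySem.Chars.splitOnMax, if_neg h1, Int.toNat_one]
  have hf : (a::b::c::d::':'::rest).length + 1 = (((((rest.length + 1) + 1) + 1) + 1) + 1) + 1 := by
    simp [List.length_cons]
  rw [hf, pvGoConsNe _ _ one_ne_zero a ha, pvGoConsNe _ _ one_ne_zero b hb,
    pvGoConsNe _ _ one_ne_zero c hc, pvGoConsNe _ _ one_ne_zero d hd, pvGoColon, pvGoMZero]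
  simp

theorem pvShape (v : List Char)
    (h : PySem.Chars.startswith (PySem.Chars.lower v) "role:".toList = true ∨
         PySem.Chars.startswith (PySem.Chars.lower v) "user:".toList = true) :
    ∃ a b c d rest, v = a::b::c::d::':'::rest ∧ a ≠ ':' ∧ b ≠ ':' ∧ c ≠ ':' ∧ d ≠ ':' := by
  have hr : "role:".toList = ['r','o','l','e',':'] := by decide
  have hu : "user:".toList = ['u','s','e','r',':'] := by decide
  have h' : ∃ p1 p2 p3 p4 : Char, p1 ≠ ':' ∧ p2 ≠ ':' ∧ p3 ≠ ':' ∧ p4 ≠ ':' ∧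
      ([p1,p2,p3,p4,':'] <+: List.map PySem.Chars.lowerChar v) := by
    rcases h with h | h
    · refine ⟨'r','o','l','e', by decide, by decide, by decide, by decide, ?_⟩
      simpa [PySem.Chars.startswith, PySem.Chars.lower, hr, List.isPrefixOf_iff_prefix] using h
    · refine ⟨'u','s','e','r', by decide, by decide, by decide, by decide, ?_⟩
      simpa [PySem.Chars.startswith, PySem.Chars.lower, hu, List.isPrefixOf_iff_prefix] using h
  obtain ⟨p1, p2, p3, p4, n1, n2, n3, n4, t, ht⟩ := h'
  rcases v with _ | ⟨a, _ | ⟨b, _ | ⟨c, _ | ⟨d, _ | ⟨e, rest⟩⟩⟩⟩⟩ <;> simp only [List.map_cons, List.map_nil] at ht <;>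
    first
    | (simp only [List.cons_append, List.nil_append, List.cons.injEq] at ht
       obtain ⟨h1, h2, h3, h4, h5, -⟩ := ht
       exact ⟨a, b, c, d, rest, by rw [pvLowerCharColon e h5.symm],
         pvLowerCharNeColon _ a n1 h1.symm, pvLowerCharNeColon _ b n2 h2.symm,
         pvLowerCharNeColon _ c n3 h3.symm, pvLowerCharNeColon _ d n4 h4.symm⟩)
    | (exfalso; have := congrArg List.length ht; simp at this; try omega)

set_option maxHeartbeats 2000000 in
theorem pvTailEq (V : String)
    (h : PySem.Str.startswith (PySem.Str.lower V) "role:" = true ∨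
         PySem.Str.startswith (PySem.Str.lower V) "user:" = true) :
    (((PySem.Str.splitMax? V ":" 1).getD [])[1]?).getD "" = PySem.Str.slice V (some 5) none := by
  have h' : PySem.Chars.startswith (PySem.Chars.lower V.toList) "role:".toList = true ∨
      PySem.Chars.startswith (PySem.Chars.lower V.toList) "user:".toList = true := by
    simpa [PySem.Str.startswith, PySem.Str.lower] using h
  obtain ⟨a, b, c, d, rest, hv, ha, hb, hc, hd⟩ := pvShape V.toList h'
  have hsep : (":".toList) = [':'] := by decide
  simp only [PySem.Str.splitMax?, PySem.Chars.splitMax?, hsep, List.isEmpty_cons, Bool.false_eq_true,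
    if_false, Option.map_some, Option.getD_some]
  rw [hv, pvSplitColon a b c d rest ha hb hc hd]
  simp only [List.map_cons, List.map_nil, List.getElem?_cons_succ, List.getElem?_cons_zero,
    Option.getD_some]
  simp only [PySem.Str.slice, PySem.Chars.slice_eq_listSlice, hv]
  rw [PySem.List.slice_from]
  · simp
  · norm_num

theorem pvStripEqOfLen (l : List Char) (h : (PySem.Chars.strip l).length = l.length) :
    PySem.Chars.strip l = l := by
  have h1 : PySem.Chars.lstrip l <:+ l := List.dropWhile_suffix _
  have h2 : PySem.Chars.strip l <+: PySem.Chars.lstrip l := by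
    refine List.reverse_suffix.mp ?_
    simp only [PySem.Chars.strip, PySem.Chars.rstrip, List.reverse_reverse]
    exact List.dropWhile_suffix _
  have l1 : (PySem.Chars.lstrip l).length ≤ l.length := h1.length_le
  have l2 : (PySem.Chars.strip l).length ≤ (PySem.Chars.lstrip l).length := h2.length_le
  have e2 : PySem.Chars.strip l = PySem.Chars.lstrip l := h2.eq_of_length (by omega)
  rw [e2]
  exact h1.eq_of_length (by omega)

theorem pvDec (v v1 v2 : List Char)
    (h1 : (PySem.Chars.startswith (PySem.Chars.lower v) "role:".toList = true ∧
             v1 = PySem.Chars.strip (v.drop 5)) ∨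
          (PySem.Chars.startswith (PySem.Chars.lower v) "user:".toList = true ∧
             v1 = PySem.Chars.strip (v.drop 5)) ∨
          (PySem.Chars.startswith (PySem.Chars.lower v) "role:".toList = false ∧
           PySem.Chars.startswith (PySem.Chars.lower v) "user:".toList = false ∧ v1 = v))
    (h2 : v2.length + 3 ≤ v1.length ∨ v2 = v1)
    (hfin : PySem.Chars.startswith (PySem.Chars.lower (PySem.Chars.strip v2)) "role:".toList = true ∨
            PySem.Chars.startswith (PySem.Chars.lower (PySem.Chars.strip v2)) "user:".toList = true) :
    (PySem.Chars.strip v2).length < v.length := by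
  have hs2 : (PySem.Chars.strip v2).length ≤ v2.length := pvStripLen v2
  rcases h1 with ⟨hsw, hv1⟩ | ⟨hsw, hv1⟩ | ⟨hn1, hn2, hv1⟩
  · obtain ⟨a, b, c, d, rest, hsh, -, -, -, -⟩ := pvShape v (Or.inl hsw)
    have hlen : v.length = rest.length + 5 := by rw [hsh]; simp
    have hdrop : v.drop 5 = rest := by rw [hsh]; rfl
    have hv1len : v1.length ≤ rest.length := by
      rw [hv1, hdrop]; exact pvStripLen rest
    rcases h2 with h2 | h2
    · omega
    · subst h2; omega
  · obtain ⟨a, b, c, d, rest, hsh, -, -, -, -⟩ := pvShape v (Or.inr hsw)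
    have hlen : v.length = rest.length + 5 := by rw [hsh]; simp
    have hdrop : v.drop 5 = rest := by rw [hsh]; rfl
    have hv1len : v1.length ≤ rest.length := by
      rw [hv1, hdrop]; exact pvStripLen rest
    rcases h2 with h2 | h2
    · omega
    · subst h2; omega
  · rcases h2 with h2 | h2
    · rw [hv1] at h2; omega
    · rw [h2, hv1] at hs2 ⊢
      rcases Nat.lt_or_ge (PySem.Chars.strip v).length v.length with hlt | hge
      · exact hlt
      · exfalso
        have heq : PySem.Chars.strip v = v := pvStripEqOfLen v (by omega)
        rw [h2, hv1, heq] at hfin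
        rcases hfin with hf | hf
        · rw [hn1] at hf; exact Bool.false_ne_true hf
        · rw [hn2] at hf; exact Bool.false_ne_true hf

theorem pvInner3 (v1 : List Char) (hs : PySem.Chars.startswith v1 "<@".toList = true)
    (he : PySem.Chars.endswith v1 ">".toList = true) : 3 ≤ v1.length := by
  have h2 : "<@".toList = ['<','@'] := by decide
  rw [h2] at hs
  simp only [PySem.Chars.startswith, List.isPrefixOf_iff_prefix] at hs
  obtain ⟨t, ht⟩ := hs
  cases t with
  | nil =>
    exfalso
    rw [← ht] at he
    revert he
    decide
  | cons x w => rw [← ht]; simp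

theorem pvInnerLen (v1 : List Char) (h3 : 3 ≤ v1.length) :
    (PySem.List.slice v1 (some 2) (some (-1))).length = v1.length - 3 := by
  rw [PySem.List.length_slice]
  rw [PySem.List.clampIdx_neg_one]
  have : PySem.List.clampIdx v1.length 2 = 2 := by
    simp [PySem.List.clampIdx]
    omega
  rw [this]
  omega

theorem pvDecStr (value tvsnd tv2snd : String)
    (h1 : (PySem.Str.startswith (PySem.Str.lower value) "role:" = true ∧
             tvsnd.toList = PySem.Chars.strip (value.toList.drop 5)) ∨
          (PySem.Str.startswith (PySem.Str.lower value) "user:" = true ∧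
             tvsnd.toList = PySem.Chars.strip (value.toList.drop 5)) ∨
          (PySem.Str.startswith (PySem.Str.lower value) "role:" = false ∧
           PySem.Str.startswith (PySem.Str.lower value) "user:" = false ∧ tvsnd = value))
    (h2 : ((PySem.Str.startswith tvsnd "<@" && PySem.Str.endswith tvsnd ">") = true ∧
             (tv2snd = PySem.Str.slice (PySem.Str.slice tvsnd (some 2) (some (-1))) (some 1) none ∨
              tv2snd = PySem.Str.slice tvsnd (some 2) (some (-1)))) ∨
          tv2snd = tvsnd)
    (hcond : (PySem.Str.startswith (PySem.Str.lower (PySem.Str.strip tv2snd)) "role:" ||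
              PySem.Str.startswith (PySem.Str.lower (PySem.Str.strip tv2snd)) "user:") = true) :
    (PySem.Str.strip tv2snd).length < value.length := by
  have hb : ∀ s : String, PySem.Str.startswith (PySem.Str.lower s) "role:"
      = PySem.Chars.startswith (PySem.Chars.lower s.toList) "role:".toList := by
    intro s; simp [PySem.Str.startswith, PySem.Str.lower]
  have hb' : ∀ s : String, PySem.Str.startswith (PySem.Str.lower s) "user:"
      = PySem.Chars.startswith (PySem.Chars.lower s.toList) "user:".toList := by
    intro s; simp [PySem.Str.startswith, PySem.Str.lower]
  have h1' : (PySem.Chars.startswith (PySem.Chars.lower value.toList) "role:".toList = true ∧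
               tvsnd.toList = PySem.Chars.strip (value.toList.drop 5)) ∨
             (PySem.Chars.startswith (PySem.Chars.lower value.toList) "user:".toList = true ∧
               tvsnd.toList = PySem.Chars.strip (value.toList.drop 5)) ∨
             (PySem.Chars.startswith (PySem.Chars.lower value.toList) "role:".toList = false ∧
              PySem.Chars.startswith (PySem.Chars.lower value.toList) "user:".toList = false ∧
              tvsnd.toList = value.toList) := by
    rcases h1 with ⟨hc, ht⟩ | ⟨hc, ht⟩ | ⟨hc1, hc2, ht⟩
    · exact Or.inl ⟨by rw [← hb]; exact hc, ht⟩
    · exact Or.inr (Or.inl ⟨by rw [← hb']; exact hc, ht⟩)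
    · exact Or.inr (Or.inr ⟨by rw [← hb]; exact hc1, by rw [← hb']; exact hc2, by rw [ht]⟩)
  have h2' : tv2snd.toList.length + 3 ≤ tvsnd.toList.length ∨ tv2snd.toList = tvsnd.toList := by
    rcases h2 with ⟨hc, ht⟩ | ht
    · left
      have hsw : PySem.Chars.startswith tvsnd.toList "<@".toList = true := by
        have := (Bool.and_eq_true _ _).mp hc
        simpa [PySem.Str.startswith] using this.1
      have hew : PySem.Chars.endswith tvsnd.toList ">".toList = true := by
        have := (Bool.and_eq_true _ _).mp hc
        simpa [PySem.Str.endswith] using this.2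
      have h3 : 3 ≤ tvsnd.toList.length := pvInner3 _ hsw hew
      have hinner : (PySem.Str.slice tvsnd (some 2) (some (-1))).toList.length
          = tvsnd.toList.length - 3 := by
        simp only [PySem.Str.slice, String.toList_ofList, PySem.Chars.slice_eq_listSlice]
        exact pvInnerLen _ h3
      rcases ht with ht | ht
      · rw [ht]
        simp only [PySem.Str.slice, String.toList_ofList, PySem.Chars.slice_eq_listSlice]
        rw [PySem.List.slice_from_one]
        have := hinner
        simp only [PySem.Str.slice, String.toList_ofList, PySem.Chars.slice_eq_listSlice] at this
        rw [List.length_tail, this]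
        omega
      · rw [ht, hinner]; omega
    · right; rw [ht]
  have hfin : PySem.Chars.startswith (PySem.Chars.lower (PySem.Chars.strip tv2snd.toList)) "role:".toList = true ∨
      PySem.Chars.startswith (PySem.Chars.lower (PySem.Chars.strip tv2snd.toList)) "user:".toList = true := by
    rcases Bool.or_eq_true_iff.mp hcond with hc | hc
    · left
      rw [hb] at hc
      simpa [PySem.Str.strip, String.toList_ofList] using hc
    · right
      rw [hb'] at hc
      simpa [PySem.Str.strip, String.toList_ofList] using hc
  have key := pvDec value.toList tvsnd.toList tv2snd.toList h1' h2' hfin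
  have hlen1 : (PySem.Str.strip tv2snd).length = (PySem.Chars.strip tv2snd.toList).length := by
    rw [← String.length_toList]
    simp [PySem.Str.strip, String.toList_ofList]
  have hlen2 : value.toList.length = value.length := String.length_toList
  omega

theorem pvStripToList (V : String) : (PySem.Str.strip V).toList = PySem.Chars.strip V.toList := by
  simp [PySem.Str.strip]

theorem pvSliceFive (V : String) : (PySem.Str.slice V (some 5) none).toList = V.toList.drop 5 := by
  simp only [PySem.Str.slice, String.toList_ofList, PySem.Chars.slice_eq_listSlice]
  rw [show (5:Int) = ((5:Nat):Int) by norm_num, PySem.List.slice_from_natCast]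

theorem pvStripStrLen (e : String) : (PySem.Str.strip e).length ≤ e.length := by
  rw [← String.length_toList, ← String.length_toList (s := e), pvStripToList]
  exact pvStripLen e.toList

theorem pvDropWhileHead {α : Type} (p : α → Bool) (l : List α) (a : α) (t : List α)
    (h : List.dropWhile p l = a :: t) : p a = false := by
  induction l with
  | nil => simp at h
  | cons b l ih =>
    by_cases hb : p b = true
    · exact ih (by simpa [List.dropWhile_cons, hb] using h)
    · rw [List.dropWhile_cons, if_neg (by simp [hb])] at h
      cases h; simpa using hb

theorem pvDropWhileIdem {α : Type} (p : α → Bool) (l : List α) :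
    List.dropWhile p (List.dropWhile p l) = List.dropWhile p l := by
  induction l with
  | nil => simp
  | cons a l ih =>
    by_cases h : p a = true
    · simpa [h] using ih
    · simp [h]

theorem pvStripIdem (l : List Char) :
    PySem.Chars.strip (PySem.Chars.strip l) = PySem.Chars.strip l := by
  simp only [PySem.Chars.strip, PySem.Chars.lstrip, PySem.Chars.rstrip]
  generalize hy : List.dropWhile PySem.Chars.isspace l = y
  set p := PySem.Chars.isspace with hp
  set z := (List.dropWhile p y.reverse).reverse with hz
  have hzy : z <+: y := by
    refine List.reverse_suffix.mp ?_
    rw [hz, List.reverse_reverse]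
    exact List.dropWhile_suffix p
  have h1 : List.dropWhile p z = z := by
    cases hzc : z with
    | nil => simp
    | cons a t =>
      obtain ⟨s, hs⟩ := hzy
      rw [hzc] at hs
      have ha : p a = false := pvDropWhileHead p l a (t ++ s) (by rw [hy]; exact hs.symm ▸ rfl)
      rw [List.dropWhile_cons, if_neg (by simp [ha])]
  rw [h1]
  have h2 : List.dropWhile p z.reverse = z.reverse := by
    rw [hz, List.reverse_reverse]
    exact pvDropWhileIdem p _
  rw [h2, List.reverse_reverse]


theorem pvHead5 (v p : String) (h5 : p.toList.length = 5) :
    (PySem.Str.lower (PySem.Str.slice v none (some 5)) = p)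
      ↔ PySem.Str.startswith (PySem.Str.lower v) p = true := by
  have hsl : (PySem.Str.slice v none (some 5)).toList = v.toList.take 5 := by
    simp only [PySem.Str.slice, String.toList_ofList, PySem.Chars.slice_eq_listSlice]
    rw [show (5:Int) = ((5:Nat):Int) by norm_num, PySem.List.slice_to_natCast]
  have hlow : ∀ s : String, (PySem.Str.lower s).toList = s.toList.map PySem.Chars.lowerChar := by
    intro s; simp [PySem.Str.lower, PySem.Chars.lower]
  constructor
  · intro h
    have h' : (PySem.Str.lower (PySem.Str.slice v none (some 5))).toList = p.toList :=
      congrArg String.toList h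
    rw [hlow, hsl, List.map_take] at h'
    have : p.toList <+: (v.toList.map PySem.Chars.lowerChar) := by
      rw [List.prefix_iff_eq_take, h5, ← h']
    simpa [PySem.Str.startswith, PySem.Chars.startswith, List.isPrefixOf_iff_prefix, hlow,
      PySem.Chars.lower] using this
  · intro h
    have h' : p.toList <+: (v.toList.map PySem.Chars.lowerChar) := by
      simpa [PySem.Str.startswith, PySem.Chars.startswith, List.isPrefixOf_iff_prefix, hlow,
        PySem.Chars.lower] using h
    rw [List.prefix_iff_eq_take, h5] at h'
    apply String.toList_inj.mp
    rw [hlow, hsl, List.map_take, ← h']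

theorem pvSplitPrefix_eq (v : String) :
    pvSplitPrefix v =
      (if PySem.Str.startswith (PySem.Str.lower v) "role:" = true then
         some ("role", PySem.Str.strip (PySem.Str.slice v (some 5) none))
       else if PySem.Str.startswith (PySem.Str.lower v) "user:" = true then
         some ("user", PySem.Str.strip (PySem.Str.slice v (some 5) none))
       else none) := by
  unfold pvSplitPrefix
  by_cases hr : PySem.Str.lower (PySem.Str.slice v none (some 5)) = "role:"
  · rw [if_pos hr, if_pos ((pvHead5 v "role:" (by decide)).mp hr)]
  · rw [if_neg hr, if_neg (fun h => hr ((pvHead5 v "role:" (by decide)).mpr h))]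
    by_cases hu : PySem.Str.lower (PySem.Str.slice v none (some 5)) = "user:"
    · rw [if_pos hu, if_pos ((pvHead5 v "user:" (by decide)).mp hu)]
    · rw [if_neg hu, if_neg (fun h => hu ((pvHead5 v "user:" (by decide)).mpr h))]

theorem pvApplyPrefix_eq (et v : String) :
    pvApplyPrefix et v =
      (if PySem.Str.startswith (PySem.Str.lower v) "role:" = true then
         ("role", PySem.Str.strip (PySem.Str.slice v (some 5) none))
       else if PySem.Str.startswith (PySem.Str.lower v) "user:" = true then
         ("user", PySem.Str.strip (PySem.Str.slice v (some 5) none))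
       else (et, v)) := by
  unfold pvApplyPrefix
  rw [pvSplitPrefix_eq]
  split_ifs <;> rfl

theorem pvUnwrapMention_eq (t v : String) :
    pvUnwrapMention t v =
      (if (PySem.Str.startswith v "<@" && PySem.Str.endswith v ">") = true then
        (if PySem.Str.startswith (PySem.Str.slice v (some 2) (some (-1))) "&" = true then
           ("role", PySem.Str.slice (PySem.Str.slice v (some 2) (some (-1))) (some 1) none)
         else if PySem.Str.startswith (PySem.Str.slice v (some 2) (some (-1))) "!" = true then
           (t, PySem.Str.slice (PySem.Str.slice v (some 2) (some (-1))) (some 1) none)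
         else (t, PySem.Str.slice v (some 2) (some (-1))))
       else (t, v)) := by
  unfold pvUnwrapMention
  by_cases hm : (PySem.Str.startswith v "<@" && PySem.Str.endswith v ">") = true
  · rw [if_neg (by simpa using hm), if_pos hm]
  · rw [if_pos (by simpa using hm), if_neg hm]

theorem pvSplitPrefix_ne_none (v : String) (h : pvSplitPrefix v ≠ none) :
    (PySem.Str.startswith (PySem.Str.lower v) "role:" ||
     PySem.Str.startswith (PySem.Str.lower v) "user:") = true := by
  rw [pvSplitPrefix_eq] at h
  by_cases hr : PySem.Str.startswith (PySem.Str.lower v) "role:" = true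
  · exact Bool.or_eq_true_iff.mpr (Or.inl hr)
  · by_cases hu : PySem.Str.startswith (PySem.Str.lower v) "user:" = true
    · exact Bool.or_eq_true_iff.mpr (Or.inr hu)
    · exfalso; exact h (by rw [if_neg hr, if_neg hu])

theorem pvStripStrIdem (s : String) : PySem.Str.strip (PySem.Str.strip s) = PySem.Str.strip s := by
  simp [PySem.Str.strip, String.toList_ofList, pvStripIdem]

theorem pvSplitPrefix_none_iff (v : String) :
    pvSplitPrefix v = none ↔
      (PySem.Str.startswith (PySem.Str.lower v) "role:" ||
       PySem.Str.startswith (PySem.Str.lower v) "user:") = false := by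
  rw [pvSplitPrefix_eq]
  by_cases hr : PySem.Str.startswith (PySem.Str.lower v) "role:" = true
  · rw [if_pos hr, hr, Bool.true_or]
    exact iff_of_false (Option.some_ne_none _) (by decide)
  · by_cases hu : PySem.Str.startswith (PySem.Str.lower v) "user:" = true
    · rw [if_neg hr, if_pos hu, hu, Bool.or_true]
      exact iff_of_false (Option.some_ne_none _) (by decide)
    · rw [if_neg hr, if_neg hu]
      rw [Bool.not_eq_true] at hr hu
      rw [hr, hu]
      exact iff_of_true rfl rfl

-- one unfolding of B's loop, rewritten into A's inline shape
set_option maxHeartbeats 2000000 in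
theorem pvBloopStep (f : Nat) (value et : String) :
    pvBloop (f+1) value et =
      (let tv :=
        if PySem.Str.startswith (PySem.Str.lower value) "role:" = true then
          ("role", PySem.Str.strip (PySem.Str.slice value (some 5) none))
        else if PySem.Str.startswith (PySem.Str.lower value) "user:" = true then
          ("user", PySem.Str.strip (PySem.Str.slice value (some 5) none))
        else (et, value)
       let tv2 :=
        if PySem.Str.startswith tv.2 "<@" && PySem.Str.endswith tv.2 ">" then
          let inner := PySem.Str.slice tv.2 (some 2) (some (-1))
          if PySem.Str.startswith inner "&" = true then ("role", PySem.Str.slice inner (some 1) none)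
          else if PySem.Str.startswith inner "!" = true then (tv.1, PySem.Str.slice inner (some 1) none)
          else (tv.1, inner)
        else tv
       let value2 := PySem.Str.strip tv2.2
       if value2 = "" then none
       else if PySem.Str.startswith (PySem.Str.lower value2) "role:" ||
               PySem.Str.startswith (PySem.Str.lower value2) "user:" then
         pvBloop f value2 tv2.1
       else some (tv2.1, value2)) := by
  conv_lhs => rw [pvBloop]
  simp only [pvApplyPrefix_eq, pvUnwrapMention_eq]
  generalize (if PySem.Str.startswith (PySem.Str.lower value) "role:" = true then
          ("role", PySem.Str.strip (PySem.Str.slice value (some 5) none))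
        else if PySem.Str.startswith (PySem.Str.lower value) "user:" = true then
          ("user", PySem.Str.strip (PySem.Str.slice value (some 5) none))
        else (et, value)) = tv
  generalize (if (PySem.Str.startswith tv.2 "<@" && PySem.Str.endswith tv.2 ">") = true then
          (if PySem.Str.startswith (PySem.Str.slice tv.2 (some 2) (some (-1))) "&" = true then
            ("role", PySem.Str.slice (PySem.Str.slice tv.2 (some 2) (some (-1))) (some 1) none)
          else if PySem.Str.startswith (PySem.Str.slice tv.2 (some 2) (some (-1))) "!" = true then
            (tv.1, PySem.Str.slice (PySem.Str.slice tv.2 (some 2) (some (-1))) (some 1) none)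
          else (tv.1, PySem.Str.slice tv.2 (some 2) (some (-1))))
        else tv) = tv2
  by_cases hz : PySem.Str.strip tv2.2 = ""
  · rw [if_pos hz, if_pos hz]
  · rw [if_neg hz, if_neg hz]
    by_cases hp : pvSplitPrefix (PySem.Str.strip tv2.2) = none
    · rw [if_pos hp, if_neg (by rw [(pvSplitPrefix_none_iff _).mp hp]; decide)]
    · rw [if_neg hp, if_pos (pvSplitPrefix_ne_none _ hp)]

theorem pvBloopCongr (f : Nat) (v : String)
    (hc : (PySem.Str.startswith (PySem.Str.lower v) "role:" ||
           PySem.Str.startswith (PySem.Str.lower v) "user:") = true) (et et' : String) :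
    pvBloop f v et = pvBloop f v et' := by
  cases f with
  | zero => rfl
  | succ f =>
    rw [pvBloopStep f v et, pvBloopStep f v et']
    by_cases hr : PySem.Str.startswith (PySem.Str.lower v) "role:" = true
    · simp only [if_pos hr]
    · have hu : PySem.Str.startswith (PySem.Str.lower v) "user:" = true := by
        rcases Bool.or_eq_true_iff.mp hc with h | h
        · exact absurd h hr
        · exact h
      simp only [if_neg hr, if_pos hu]

theorem pvTailF (f g : Nat)
    (ih : ∀ (fB : Nat) (v dt : String), v ≠ "" → PySem.Str.strip v = v →
      v.length < f → v.length < fB → pvAgo f v dt = pvBloop fB v dt)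
    (v : String) (hlenA : v.length ≤ f) (hlenB : v.length ≤ g) (t1 t2 : String)
    (h1 : (PySem.Str.startswith (PySem.Str.lower v) "role:" = true ∧
             t2.toList = PySem.Chars.strip (v.toList.drop 5)) ∨
          (PySem.Str.startswith (PySem.Str.lower v) "user:" = true ∧
             t2.toList = PySem.Chars.strip (v.toList.drop 5)) ∨
          (PySem.Str.startswith (PySem.Str.lower v) "role:" = false ∧
           PySem.Str.startswith (PySem.Str.lower v) "user:" = false ∧ t2 = v)) :
    (if PySem.Str.strip (if (PySem.Str.startswith t2 "<@" && PySem.Str.endswith t2 ">") = true then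
        (if PySem.Str.startswith (PySem.Str.slice t2 (some 2) (some (-1))) "&" = true then
          ("role", PySem.Str.slice (PySem.Str.slice t2 (some 2) (some (-1))) (some 1) none)
         else if PySem.Str.startswith (PySem.Str.slice t2 (some 2) (some (-1))) "!" = true then
          (t1, PySem.Str.slice (PySem.Str.slice t2 (some 2) (some (-1))) (some 1) none)
         else (t1, PySem.Str.slice t2 (some 2) (some (-1))))
       else (t1, t2)).2 = "" then none
     else if (PySem.Str.startswith (PySem.Str.lower (PySem.Str.strip (if (PySem.Str.startswith t2 "<@" && PySem.Str.endswith t2 ">") = true then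
        (if PySem.Str.startswith (PySem.Str.slice t2 (some 2) (some (-1))) "&" = true then
          ("role", PySem.Str.slice (PySem.Str.slice t2 (some 2) (some (-1))) (some 1) none)
         else if PySem.Str.startswith (PySem.Str.slice t2 (some 2) (some (-1))) "!" = true then
          (t1, PySem.Str.slice (PySem.Str.slice t2 (some 2) (some (-1))) (some 1) none)
         else (t1, PySem.Str.slice t2 (some 2) (some (-1))))
       else (t1, t2)).2)) "role:" ||
              PySem.Str.startswith (PySem.Str.lower (PySem.Str.strip (if (PySem.Str.startswith t2 "<@" && PySem.Str.endswith t2 ">") = true then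
        (if PySem.Str.startswith (PySem.Str.slice t2 (some 2) (some (-1))) "&" = true then
          ("role", PySem.Str.slice (PySem.Str.slice t2 (some 2) (some (-1))) (some 1) none)
         else if PySem.Str.startswith (PySem.Str.slice t2 (some 2) (some (-1))) "!" = true then
          (t1, PySem.Str.slice (PySem.Str.slice t2 (some 2) (some (-1))) (some 1) none)
         else (t1, PySem.Str.slice t2 (some 2) (some (-1))))
       else (t1, t2)).2)) "user:") = true then
       pvAgo f (PySem.Str.strip (if (PySem.Str.startswith t2 "<@" && PySem.Str.endswith t2 ">") = true then
        (if PySem.Str.startswith (PySem.Str.slice t2 (some 2) (some (-1))) "&" = true then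
          ("role", PySem.Str.slice (PySem.Str.slice t2 (some 2) (some (-1))) (some 1) none)
         else if PySem.Str.startswith (PySem.Str.slice t2 (some 2) (some (-1))) "!" = true then
          (t1, PySem.Str.slice (PySem.Str.slice t2 (some 2) (some (-1))) (some 1) none)
         else (t1, PySem.Str.slice t2 (some 2) (some (-1))))
       else (t1, t2)).2) "user"
     else some ((if (PySem.Str.startswith t2 "<@" && PySem.Str.endswith t2 ">") = true then
        (if PySem.Str.startswith (PySem.Str.slice t2 (some 2) (some (-1))) "&" = true then
          ("role", PySem.Str.slice (PySem.Str.slice t2 (some 2) (some (-1))) (some 1) none)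
         else if PySem.Str.startswith (PySem.Str.slice t2 (some 2) (some (-1))) "!" = true then
          (t1, PySem.Str.slice (PySem.Str.slice t2 (some 2) (some (-1))) (some 1) none)
         else (t1, PySem.Str.slice t2 (some 2) (some (-1))))
       else (t1, t2)).1, PySem.Str.strip (if (PySem.Str.startswith t2 "<@" && PySem.Str.endswith t2 ">") = true then
        (if PySem.Str.startswith (PySem.Str.slice t2 (some 2) (some (-1))) "&" = true then
          ("role", PySem.Str.slice (PySem.Str.slice t2 (some 2) (some (-1))) (some 1) none)
         else if PySem.Str.startswith (PySem.Str.slice t2 (some 2) (some (-1))) "!" = true then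
          (t1, PySem.Str.slice (PySem.Str.slice t2 (some 2) (some (-1))) (some 1) none)
         else (t1, PySem.Str.slice t2 (some 2) (some (-1))))
       else (t1, t2)).2))
    = (if PySem.Str.strip (if (PySem.Str.startswith t2 "<@" && PySem.Str.endswith t2 ">") = true then
        (if PySem.Str.startswith (PySem.Str.slice t2 (some 2) (some (-1))) "&" = true then
          ("role", PySem.Str.slice (PySem.Str.slice t2 (some 2) (some (-1))) (some 1) none)
         else if PySem.Str.startswith (PySem.Str.slice t2 (some 2) (some (-1))) "!" = true then
          (t1, PySem.Str.slice (PySem.Str.slice t2 (some 2) (some (-1))) (some 1) none)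
         else (t1, PySem.Str.slice t2 (some 2) (some (-1))))
       else (t1, t2)).2 = "" then none
     else if (PySem.Str.startswith (PySem.Str.lower (PySem.Str.strip (if (PySem.Str.startswith t2 "<@" && PySem.Str.endswith t2 ">") = true then
        (if PySem.Str.startswith (PySem.Str.slice t2 (some 2) (some (-1))) "&" = true then
          ("role", PySem.Str.slice (PySem.Str.slice t2 (some 2) (some (-1))) (some 1) none)
         else if PySem.Str.startswith (PySem.Str.slice t2 (some 2) (some (-1))) "!" = true then
          (t1, PySem.Str.slice (PySem.Str.slice t2 (some 2) (some (-1))) (some 1) none)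
         else (t1, PySem.Str.slice t2 (some 2) (some (-1))))
       else (t1, t2)).2)) "role:" ||
              PySem.Str.startswith (PySem.Str.lower (PySem.Str.strip (if (PySem.Str.startswith t2 "<@" && PySem.Str.endswith t2 ">") = true then
        (if PySem.Str.startswith (PySem.Str.slice t2 (some 2) (some (-1))) "&" = true then
          ("role", PySem.Str.slice (PySem.Str.slice t2 (some 2) (some (-1))) (some 1) none)
         else if PySem.Str.startswith (PySem.Str.slice t2 (some 2) (some (-1))) "!" = true then
          (t1, PySem.Str.slice (PySem.Str.slice t2 (some 2) (some (-1))) (some 1) none)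
         else (t1, PySem.Str.slice t2 (some 2) (some (-1))))
       else (t1, t2)).2)) "user:") = true then
       pvBloop g (PySem.Str.strip (if (PySem.Str.startswith t2 "<@" && PySem.Str.endswith t2 ">") = true then
        (if PySem.Str.startswith (PySem.Str.slice t2 (some 2) (some (-1))) "&" = true then
          ("role", PySem.Str.slice (PySem.Str.slice t2 (some 2) (some (-1))) (some 1) none)
         else if PySem.Str.startswith (PySem.Str.slice t2 (some 2) (some (-1))) "!" = true then
          (t1, PySem.Str.slice (PySem.Str.slice t2 (some 2) (some (-1))) (some 1) none)
         else (t1, PySem.Str.slice t2 (some 2) (some (-1))))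
       else (t1, t2)).2) (if (PySem.Str.startswith t2 "<@" && PySem.Str.endswith t2 ">") = true then
        (if PySem.Str.startswith (PySem.Str.slice t2 (some 2) (some (-1))) "&" = true then
          ("role", PySem.Str.slice (PySem.Str.slice t2 (some 2) (some (-1))) (some 1) none)
         else if PySem.Str.startswith (PySem.Str.slice t2 (some 2) (some (-1))) "!" = true then
          (t1, PySem.Str.slice (PySem.Str.slice t2 (some 2) (some (-1))) (some 1) none)
         else (t1, PySem.Str.slice t2 (some 2) (some (-1))))
       else (t1, t2)).1
     else some ((if (PySem.Str.startswith t2 "<@" && PySem.Str.endswith t2 ">") = true then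
        (if PySem.Str.startswith (PySem.Str.slice t2 (some 2) (some (-1))) "&" = true then
          ("role", PySem.Str.slice (PySem.Str.slice t2 (some 2) (some (-1))) (some 1) none)
         else if PySem.Str.startswith (PySem.Str.slice t2 (some 2) (some (-1))) "!" = true then
          (t1, PySem.Str.slice (PySem.Str.slice t2 (some 2) (some (-1))) (some 1) none)
         else (t1, PySem.Str.slice t2 (some 2) (some (-1))))
       else (t1, t2)).1, PySem.Str.strip (if (PySem.Str.startswith t2 "<@" && PySem.Str.endswith t2 ">") = true then
        (if PySem.Str.startswith (PySem.Str.slice t2 (some 2) (some (-1))) "&" = true then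
          ("role", PySem.Str.slice (PySem.Str.slice t2 (some 2) (some (-1))) (some 1) none)
         else if PySem.Str.startswith (PySem.Str.slice t2 (some 2) (some (-1))) "!" = true then
          (t1, PySem.Str.slice (PySem.Str.slice t2 (some 2) (some (-1))) (some 1) none)
         else (t1, PySem.Str.slice t2 (some 2) (some (-1))))
       else (t1, t2)).2)) := by
  generalize hT2 : (if (PySem.Str.startswith t2 "<@" && PySem.Str.endswith t2 ">") = true then
        (if PySem.Str.startswith (PySem.Str.slice t2 (some 2) (some (-1))) "&" = true then
          ("role", PySem.Str.slice (PySem.Str.slice t2 (some 2) (some (-1))) (some 1) none)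
         else if PySem.Str.startswith (PySem.Str.slice t2 (some 2) (some (-1))) "!" = true then
          (t1, PySem.Str.slice (PySem.Str.slice t2 (some 2) (some (-1))) (some 1) none)
         else (t1, PySem.Str.slice t2 (some 2) (some (-1))))
       else (t1, t2)) = T2
  have h2 : ((PySem.Str.startswith t2 "<@" && PySem.Str.endswith t2 ">") = true ∧
        (T2.2 = PySem.Str.slice (PySem.Str.slice t2 (some 2) (some (-1))) (some 1) none ∨
         T2.2 = PySem.Str.slice t2 (some 2) (some (-1)))) ∨ T2.2 = t2 := by
    by_cases hm : (PySem.Str.startswith t2 "<@" && PySem.Str.endswith t2 ">") = true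
    · rw [if_pos hm] at hT2
      refine Or.inl ⟨hm, ?_⟩
      by_cases ha : PySem.Str.startswith (PySem.Str.slice t2 (some 2) (some (-1))) "&" = true
      · rw [if_pos ha] at hT2
        rw [← hT2]
        exact Or.inl rfl
      · by_cases hx : PySem.Str.startswith (PySem.Str.slice t2 (some 2) (some (-1))) "!" = true
        · rw [if_neg ha, if_pos hx] at hT2
          rw [← hT2]
          exact Or.inl rfl
        · rw [if_neg ha, if_neg hx] at hT2
          rw [← hT2]
          exact Or.inr rfl
    · rw [if_neg hm] at hT2
      rw [← hT2]
      exact Or.inr rfl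
  by_cases hz : PySem.Str.strip T2.2 = ""
  · rw [if_pos hz, if_pos hz]
  · rw [if_neg hz, if_neg hz]
    by_cases hcnd : (PySem.Str.startswith (PySem.Str.lower (PySem.Str.strip T2.2)) "role:" ||
        PySem.Str.startswith (PySem.Str.lower (PySem.Str.strip T2.2)) "user:") = true
    · rw [if_pos hcnd, if_pos hcnd]
      have hdec : (PySem.Str.strip T2.2).length < v.length :=
        pvDecStr v t2 T2.2 h1 h2 hcnd
      rw [ih g (PySem.Str.strip T2.2) "user" hz (pvStripStrIdem T2.2) (by omega) (by omega)]
      exact pvBloopCongr g _ hcnd "user" T2.1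
    · rw [if_neg hcnd, if_neg hcnd]

set_option maxHeartbeats 2000000 in
theorem pvLoopEqF : ∀ (fA fB : Nat) (v dt : String), v ≠ "" →
    PySem.Str.strip v = v → v.length < fA → v.length < fB → pvAgo fA v dt = pvBloop fB v dt := by
  intro fA
  induction fA with
  | zero =>
    intro fB v dt _ _ hA _
    omega
  | succ f ih =>
    intro fB v dt hne hstrip hA hB
    obtain ⟨g, rfl⟩ : ∃ g, fB = g + 1 := ⟨fB - 1, by omega⟩
    conv_lhs => rw [pvAgo]
    conv_rhs => rw [pvBloopStep]
    rw [if_neg hne]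
    simp only [hstrip]
    rw [if_neg hne]
    by_cases hr : PySem.Str.startswith (PySem.Str.lower v) "role:" = true
    · simp only [if_pos hr]
      rw [pvTailEq v (Or.inl hr)]
      exact pvTailF f g ih v (by omega) (by omega) _ _ (Or.inl ⟨hr, by
        rw [pvStripToList, pvSliceFive]⟩)
    · by_cases hu : PySem.Str.startswith (PySem.Str.lower v) "user:" = true
      · simp only [if_neg hr, if_pos hu]
        rw [pvTailEq v (Or.inr hu)]
        exact pvTailF f g ih v (by omega) (by omega) _ _ (Or.inr (Or.inl ⟨hu, by
          rw [pvStripToList, pvSliceFive]⟩))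
      · simp only [if_neg hr, if_neg hu]
        exact pvTailF f g ih v (by omega) (by omega) _ _ (Or.inr (Or.inr
          ⟨Bool.not_eq_true _ ▸ hr, Bool.not_eq_true _ ▸ hu, rfl⟩))

set_option maxHeartbeats 2000000 in
theorem pvMain : ∀ (entry default_type : String),
    parse_authorization_entry entry default_type = parse_authorization_entry_alt entry default_type := by
  intro entry dt
  conv_lhs => rw [parse_authorization_entry, pvAgo]
  conv_rhs => rw [parse_authorization_entry_alt]
  by_cases he : entry = ""
  · rw [if_pos he, if_pos he]
  · rw [if_neg he, if_neg he]
    simp only []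
    by_cases hv : PySem.Str.strip entry = ""
    · rw [if_pos hv, if_pos hv]
    · rw [if_neg hv, if_neg hv]
      conv_rhs => rw [pvBloopStep]
      have hle : (PySem.Str.strip entry).length ≤ entry.length := pvStripStrLen entry
      have ihA : ∀ (fB : Nat) (v dt : String), v ≠ "" → PySem.Str.strip v = v →
          v.length < entry.length → v.length < fB →
          pvAgo entry.length v dt = pvBloop fB v dt := by
        intro fB v dt h1 h2 h3 h4
        exact pvLoopEqF entry.length fB v dt h1 h2 h3 h4
      by_cases hr : PySem.Str.startswith (PySem.Str.lower (PySem.Str.strip entry)) "role:" = true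
      · simp only [if_pos hr]
        rw [pvTailEq (PySem.Str.strip entry) (Or.inl hr)]
        exact pvTailF entry.length entry.length ihA
          (PySem.Str.strip entry) hle hle _ _ (Or.inl ⟨hr, by rw [pvStripToList, pvSliceFive]⟩)
      · by_cases hu : PySem.Str.startswith (PySem.Str.lower (PySem.Str.strip entry)) "user:" = true
        · simp only [if_neg hr, if_pos hu]
          rw [pvTailEq (PySem.Str.strip entry) (Or.inr hu)]
          exact pvTailF entry.length entry.length ihA
            (PySem.Str.strip entry) hle hle _ _ (Or.inr (Or.inl ⟨hu, by rw [pvStripToList, pvSliceFive]⟩))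
        · simp only [if_neg hr, if_neg hu]
          exact pvTailF entry.length entry.length ihA
            (PySem.Str.strip entry) hle hle _ _ (Or.inr (Or.inr
              ⟨Bool.not_eq_true _ ▸ hr, Bool.not_eq_true _ ▸ hu, rfl⟩))

-- ===== VERDICT (by name: the statement is the Claim_ definition above) =====
theorem parse_authorization_entry_spec : Claim_equal_parse_authorization_entry := by
  intro entry default_type _
  exact pvMain entry default_type
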